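-- pv_equiv track=rewrite | github.com/AlexJM9/python-ws | clase1/tarea_2_josue_masapanta.py | ejercicio2
-- ===== SOURCE A (Python) =====
-- def validar_intervalo(menor, mayor):
--     return menor < mayor
--
-- def obtener_pares(menor, mayor):
--     pares = []
--     for num in range(menor, mayor + 1):
--         if num % 2 == 0:
--             pares.append(num)
--     return pares
--
-- def ejercicio2(menor, mayor):
--     if not validar_intervalo(menor, mayor):
--         return "El número menor debe ser menor que el mayor."
--
--     pares = obtener_pares(menor, mayor)
--     cantidad = mayor - menor + 1
--
--     mensaje = f"\nNúmeros pares entre {menor} y {mayor}:\n"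
--     mensaje += ", ".join(str(p) for p in pares)
--     mensaje += f"\n\nCantidad total de números en el intervalo: {cantidad}"
--     return mensaje
-- ===== SOURCE B (Python) =====
-- def ejercicio2(menor, mayor):
--     if menor >= mayor:
--         return "El número menor debe ser menor que el mayor."
--     start = menor if menor % 2 == 0 else menor + 1
--     pares = range(start, mayor + 1, 2)
--     return (f"\nNúmeros pares entre {menor} y {mayor}:\n"
--             + ", ".join(map(str, pares))
--             + f"\n\nCantidad total de números en el intervalo: {mayor - menor + 1}")
-- ===== Notes on version B (the rewrite author's own statement) =====
-- stated objective: idiomatic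
-- what changed: B generates the even numbers directly as an arithmetic progression range(start, mayor+1, 2) instead of scanning every integer in the interval and filtering with a per-number modulo test, and builds the message in one expression instead of incremental += with helper functions.
import Mathlib
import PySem

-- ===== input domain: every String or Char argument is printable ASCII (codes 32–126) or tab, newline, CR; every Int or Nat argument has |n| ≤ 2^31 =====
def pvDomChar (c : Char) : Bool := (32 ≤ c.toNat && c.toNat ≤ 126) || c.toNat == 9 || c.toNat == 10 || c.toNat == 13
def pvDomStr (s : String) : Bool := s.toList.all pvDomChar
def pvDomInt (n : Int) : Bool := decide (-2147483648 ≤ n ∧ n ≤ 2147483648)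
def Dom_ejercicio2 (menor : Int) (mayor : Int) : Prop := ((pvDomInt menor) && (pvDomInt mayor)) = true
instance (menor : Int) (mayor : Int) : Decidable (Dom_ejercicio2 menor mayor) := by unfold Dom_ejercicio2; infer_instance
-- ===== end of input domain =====

-- B generates the evens directly as a step-2 arithmetic progression instead of filtering every
-- interval number with a modulo test, and builds the message in one expression (idiomatic).


-- ===== PORT A =====
def validar_intervalo (menor : Int) (mayor : Int) : Bool :=
  decide (menor < mayor)

def obtener_pares (menor : Int) (mayor : Int) : List Int :=
  (PySem.List.pyRange menor (mayor + 1) 1).foldl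
    (fun pares num => if PySem.Int.mod num 2 == 0 then pares ++ [num] else pares) []

def ejercicio2 (menor : Int) (mayor : Int) : String :=
  if !validar_intervalo menor mayor then
    "El número menor debe ser menor que el mayor."
  else
    let pares := obtener_pares menor mayor
    let cantidad := mayor - menor + 1
    let mensaje := "\nNúmeros pares entre " ++ PySem.Int.toStr menor ++ " y " ++
      PySem.Int.toStr mayor ++ ":\n"
    let mensaje := mensaje ++ PySem.Str.join ", " (pares.map PySem.Int.toStr)
    let mensaje := mensaje ++ "\n\nCantidad total de números en el intervalo: " ++
      PySem.Int.toStr cantidad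
    mensaje

-- ===== PORT B =====
def ejercicio2_alt (menor : Int) (mayor : Int) : String :=
  if menor ≥ mayor then
    "El número menor debe ser menor que el mayor."
  else
    let start := if PySem.Int.mod menor 2 == 0 then menor else menor + 1
    let pares := PySem.List.pyRange start (mayor + 1) 2
    "\nNúmeros pares entre " ++ PySem.Int.toStr menor ++ " y " ++ PySem.Int.toStr mayor ++
      ":\n" ++ PySem.Str.join ", " (pares.map PySem.Int.toStr) ++
      "\n\nCantidad total de números en el intervalo: " ++ PySem.Int.toStr (mayor - menor + 1)

-- ===== PRECONDITION & SPEC =====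
def Spec_ejercicio2 (menor : Int) (mayor : Int) (out : String) : Prop := out = ejercicio2_alt menor mayor
instance (menor : Int) (mayor : Int) (out : String) : Decidable (Spec_ejercicio2 menor mayor out) := by unfold Spec_ejercicio2; infer_instance

-- ===== CLAIM (what is proved, stated in full; the proofs are below) =====
def Claim_equal_ejercicio2 : Prop := ∀ (menor : Int) (mayor : Int), Dom_ejercicio2 menor mayor → Spec_ejercicio2 menor mayor (ejercicio2 menor mayor)

-- ===== LEMMAS AND PROOFS =====

-- cons form of a step-2 range
lemma pyRange_two_cons (a b : Int) (h : a < b) :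
    PySem.List.pyRange a b 2 = a :: PySem.List.pyRange (a + 2) b 2 := by
  rw [PySem.List.pyRange_of_pos a b (by norm_num),
      PySem.List.pyRange_of_pos (a + 2) b (by norm_num)]
  by_cases h2 : a + 2 < b
  · simp only [if_pos h, if_pos h2]
    have hn : ((b - a + 2 - 1) / 2).toNat = ((b - (a + 2) + 2 - 1) / 2).toNat + 1 := by omega
    rw [hn, List.range_succ_eq_map]
    simp [Function.comp, List.map_map]
    intro k _
    ring
  · simp only [if_pos h, if_neg h2]
    have hn : ((b - a + 2 - 1) / 2).toNat = 1 := by omega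
    rw [hn]
    simp

-- the evens of [a, b) as a step-2 progression
lemma filter_even_pyRange (a b : Int) :
    (PySem.List.pyRange a b 1).filter (fun num => PySem.Int.mod num 2 == 0) =
      PySem.List.pyRange (if PySem.Int.mod a 2 == 0 then a else a + 1) b 2 := by
  by_cases hab : a < b
  · have hlen : (b - (a + 1)).toNat < (b - a).toNat := by omega
    rw [PySem.List.pyRange_one_cons hab, List.filter_cons, filter_even_pyRange (a + 1) b]
    have haa : a + 1 + 1 = a + 2 := by ring
    have hmod : ∀ x : Int, PySem.Int.mod x 2 = x % 2 :=
      fun x => PySem.Int.mod_eq_emod_of_pos (by norm_num)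
    simp only [hmod]
    by_cases he : a % 2 = 0
    · rw [if_pos (by simp; omega), if_neg (by simp; omega), if_pos (by simp; omega), haa,
          pyRange_two_cons a b hab]
    · rw [if_neg (by simp; omega), if_pos (by simp; omega), if_neg (by simp; omega)]
  · rw [PySem.List.pyRange_one_eq_nil (by omega), List.filter_nil]
    have hs : ¬ (if PySem.Int.mod a 2 == 0 then a else a + 1) < b := by
      split <;> omega
    rw [PySem.List.pyRange_of_pos _ b (by norm_num : (0:Int) < 2), if_neg hs]
    simp
termination_by (b - a).toNat

-- A's accumulator loop is a filter
lemma obtener_pares_eq (menor mayor : Int) :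
    obtener_pares menor mayor =
      (PySem.List.pyRange menor (mayor + 1) 1).filter (fun num => PySem.Int.mod num 2 == 0) := by
  unfold obtener_pares
  rw [PySem.List.foldl_append_if_eq_filter]
  simp

-- ===== VERDICT (by name: the statement is the Claim_ definition above) =====
theorem ejercicio2_spec : Claim_equal_ejercicio2 := by
  intro menor mayor _
  unfold Spec_ejercicio2 ejercicio2 ejercicio2_alt validar_intervalo
  by_cases h : menor < mayor
  · have h2 : ¬ menor ≥ mayor := by omega
    simp only [decide_eq_true h, Bool.not_true, Bool.false_eq_true, if_false, if_neg h2,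
      obtener_pares_eq, filter_even_pyRange]
  · have h2 : menor ≥ mayor := by omega
    simp [h, h2]
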